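-- pv_equiv track=rewrite | github.com/alexarnoni/Luro | app/services/llm_client.py | _normalize_category_choice
-- ===== SOURCE A (Python) =====
-- def _normalize_category_choice(raw_response: str, category_names: list[str]) -> str:
--     cleaned = (raw_response or "").strip().splitlines()[0]
--     cleaned = cleaned.strip(" -•\t.:\"'")
--     for name in category_names:
--         if cleaned.lower() == name.lower():
--             return name
--     for name in category_names:
--         if cleaned.lower() in name.lower() or name.lower() in cleaned.lower():
--             return name
--     return category_names[0]
-- ===== SOURCE B (Python) =====
-- def _normalize_category_choice(raw_response: str, category_names: list[str]) -> str:
--     cleaned = (raw_response or "").strip().splitlines()[0]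
--     cleaned = cleaned.strip(" -\u2022\t.:\"'")
--     cl = cleaned.lower()
--     candidate = None
--     for name in category_names:
--         nl = name.lower()
--         if cl == nl:
--             return name
--         if candidate is None and (cl in nl or nl in cl):
--             candidate = name
--     return candidate if candidate is not None else category_names[0]
-- ===== Notes on version B (the rewrite author's own statement) =====
-- stated objective: alternative
-- what changed: The two sequential passes (exact-match loop, then substring loop) are fused into a single pass over category_names that returns an exact match on sight and maintains the first substring-match candidate for the end.
import Mathlib
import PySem

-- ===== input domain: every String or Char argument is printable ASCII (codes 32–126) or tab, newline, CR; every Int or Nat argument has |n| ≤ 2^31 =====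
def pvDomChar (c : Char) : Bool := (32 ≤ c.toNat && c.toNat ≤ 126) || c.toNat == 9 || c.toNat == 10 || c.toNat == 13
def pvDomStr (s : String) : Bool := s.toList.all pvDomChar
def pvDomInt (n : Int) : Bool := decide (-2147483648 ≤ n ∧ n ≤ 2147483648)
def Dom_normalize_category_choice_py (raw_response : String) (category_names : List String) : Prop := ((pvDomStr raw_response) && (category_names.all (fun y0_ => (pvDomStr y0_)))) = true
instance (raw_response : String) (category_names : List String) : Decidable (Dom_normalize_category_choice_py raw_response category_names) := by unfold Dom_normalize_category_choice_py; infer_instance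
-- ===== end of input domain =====

-- B fuses A's two sequential loops into one pass keeping a first-substring-match candidate; same return value (objective: alternative).
-- ===== PORT A =====
-- the cleaning preamble shared by the two Pythons: (raw or "").strip().splitlines()[0].strip(" -•\t.:\"'")
def pvCleaned (raw_response : String) : String :=
  PySem.Str.stripChars (PySem.List.pyGetD (PySem.Str.splitlines (PySem.Str.strip raw_response)) 0 "") " -•\t.:\"'"

-- first loop of A: first name with cleaned.lower() == name.lower()
def pvLoopExact (cleaned : String) : List String → Option String
  | [] => none
  | n :: rest =>
      if PySem.Str.lower cleaned == PySem.Str.lower n then some n else pvLoopExact cleaned rest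

-- second loop of A: first name with cleaned.lower() in name.lower() or name.lower() in cleaned.lower()
def pvLoopSub (cleaned : String) : List String → Option String
  | [] => none
  | n :: rest =>
      if PySem.Str.isIn (PySem.Str.lower cleaned) (PySem.Str.lower n)
         || PySem.Str.isIn (PySem.Str.lower n) (PySem.Str.lower cleaned) then some n
      else pvLoopSub cleaned rest

def normalize_category_choice_py (raw_response : String) (category_names : List String) : String :=
  let cleaned := pvCleaned raw_response
  match pvLoopExact cleaned category_names with
  | some n => n
  | none =>
      match pvLoopSub cleaned category_names with
      | some n => n
      | none => PySem.List.pyGetD category_names 0 ""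

-- ===== PORT B =====
-- B's single loop: return an exact match on sight, remember the first substring-match candidate
def pvScan (cl : String) (candidate : Option String) : List String → Option String
  | [] => candidate
  | n :: rest =>
      let nl := PySem.Str.lower n
      if cl == nl then some n
      else pvScan cl
        (if candidate.isNone && (PySem.Str.isIn cl nl || PySem.Str.isIn nl cl) then some n else candidate)
        rest

def normalize_category_choice_py_alt (raw_response : String) (category_names : List String) : String :=
  let cleaned := pvCleaned raw_response
  let cl := PySem.Str.lower cleaned
  match pvScan cl none category_names with
  | some n => n
  | none => PySem.List.pyGetD category_names 0 ""

-- ===== PRECONDITION & SPEC =====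
-- Pre_ excludes exactly the inputs where A raises IndexError: a raw_response that strips to "" (splitlines()[0] fails),
-- and an empty category_names list (category_names[0] is reached since both loops find nothing).
def Pre_normalize_category_choice_py (raw_response : String) (category_names : List String) : Prop :=
  PySem.Str.strip raw_response ≠ "" ∧ category_names ≠ []
instance (raw_response : String) (category_names : List String) : Decidable (Pre_normalize_category_choice_py raw_response category_names) := by unfold Pre_normalize_category_choice_py; infer_instance

def pvWitness_normalize_category_choice_py : String × List String := ("  Food.", ["Food", "Travel"])

def Spec_normalize_category_choice_py (raw_response : String) (category_names : List String) (out : String) : Prop := out = normalize_category_choice_py_alt raw_response category_names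
instance (raw_response : String) (category_names : List String) (out : String) : Decidable (Spec_normalize_category_choice_py raw_response category_names out) := by unfold Spec_normalize_category_choice_py; infer_instance

-- ===== CLAIM (what is proved, stated in full; the proofs are below) =====
def Claim_equal_normalize_category_choice_py : Prop := ∀ (raw_response : String) (category_names : List String), Dom_normalize_category_choice_py raw_response category_names → Pre_normalize_category_choice_py raw_response category_names → Spec_normalize_category_choice_py raw_response category_names (normalize_category_choice_py raw_response category_names)

-- ===== LEMMAS AND PROOFS =====
-- the fused scan computes: first exact match, else the candidate if set, else the first substring match
theorem pvScan_eq (cleaned : String) (cats : List String) :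
    ∀ candidate : Option String,
      pvScan (PySem.Str.lower cleaned) candidate cats =
        match pvLoopExact cleaned cats with
        | some n => some n
        | none =>
            match candidate with
            | some c => some c
            | none => pvLoopSub cleaned cats := by
  induction cats with
  | nil => intro candidate; cases candidate <;> rfl
  | cons n rest ih =>
    intro candidate
    by_cases hx : PySem.Str.lower cleaned == PySem.Str.lower n
    · simp [pvScan, pvLoopExact, hx]
    · rw [show pvScan (PySem.Str.lower cleaned) candidate (n :: rest) =
          pvScan (PySem.Str.lower cleaned)
            (if candidate.isNone && (PySem.Str.isIn (PySem.Str.lower cleaned) (PySem.Str.lower n)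
                || PySem.Str.isIn (PySem.Str.lower n) (PySem.Str.lower cleaned))
             then some n else candidate) rest from by simp [pvScan, hx]]
      rw [ih]
      cases candidate with
      | some c => simp [pvLoopExact, hx]
      | none =>
        simp only [pvLoopExact, pvLoopSub, hx, Bool.false_eq_true, if_false, Option.isNone_none,
          Bool.true_and]
        cases pvLoopExact cleaned rest with
        | some m => simp
        | none => split_ifs <;> rfl

-- ===== VERDICT (by name: the statement is the Claim_ definition above) =====
theorem normalize_category_choice_py_spec : Claim_equal_normalize_category_choice_py := by
  intro raw_response category_names _ _
  unfold Spec_normalize_category_choice_py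
  show (match pvLoopExact (pvCleaned raw_response) category_names with
    | some n => n
    | none =>
      match pvLoopSub (pvCleaned raw_response) category_names with
      | some n => n
      | none => PySem.List.pyGetD category_names 0 "") =
    (match pvScan (PySem.Str.lower (pvCleaned raw_response)) none category_names with
    | some n => n
    | none => PySem.List.pyGetD category_names 0 "")
  rw [pvScan_eq (pvCleaned raw_response) category_names none]
  cases pvLoopExact (pvCleaned raw_response) category_names with
  | some n => rfl
  | none => cases pvLoopSub (pvCleaned raw_response) category_names <;> rfl
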